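-- pv_equiv track=rewrite | github.com/ParkPan/confServer | ConfSrv.py | get_adapte_version
-- ===== SOURCE A (Python) =====
-- def get_adapte_version(ver_adapte, ver_collection):
--     ret_ver = ver_adapte
--     if ver_adapte == "latest":
--         return ret_ver
--     else:
--         tmpindex = ver_collection.index("latest")
--         del ver_collection[tmpindex]
--         if len(ver_collection) == 0:
--             return "latest"
--         ver_collection.sort(reverse=True)
--         if ver_adapte > ver_collection[0]:
--             return "latest"
--         else:
--             for i in range(len(ver_collection)):
--                 if ver_adapte > ver_collection[i]:
--                     ret_ver = ver_collection[i - 1]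
--                     break
--             else:
--                 ret_ver = ver_collection[len(ver_collection) - 1]
--     return ret_ver
-- ===== SOURCE B (Python) =====
-- def get_adapte_version(ver_adapte, ver_collection):
--     if ver_adapte == "latest":
--         return ver_adapte
--     ver_collection.remove("latest")
--     ver_collection.sort(reverse=True)
--     candidates = [v for v in ver_collection if v >= ver_adapte]
--     return min(candidates) if candidates else "latest"
-- ===== Notes on version B (the rewrite author's own statement) =====
-- stated objective: simpler
-- what changed: A's three result branches (empty-collection check, above-max check, indexed for/else scan with break and i-1 back-reference) are collapsed into one filter of versions >= ver_adapte followed by min-or-'latest'; the in-place delete of 'latest' and descending sort (and the ValueError when 'latest' is missing) are preserved.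
import Mathlib
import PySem

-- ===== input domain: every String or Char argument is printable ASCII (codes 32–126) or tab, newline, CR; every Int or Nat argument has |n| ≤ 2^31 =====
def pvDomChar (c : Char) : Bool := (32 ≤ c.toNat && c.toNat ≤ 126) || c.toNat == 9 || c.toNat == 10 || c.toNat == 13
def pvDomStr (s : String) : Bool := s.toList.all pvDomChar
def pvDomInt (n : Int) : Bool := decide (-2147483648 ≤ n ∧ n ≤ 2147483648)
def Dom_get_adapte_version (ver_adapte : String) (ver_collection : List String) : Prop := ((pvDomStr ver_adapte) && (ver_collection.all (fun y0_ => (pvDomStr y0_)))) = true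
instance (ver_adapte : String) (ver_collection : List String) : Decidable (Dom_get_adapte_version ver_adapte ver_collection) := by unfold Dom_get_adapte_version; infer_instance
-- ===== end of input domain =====

-- B collapses A's three result branches (empty collection, above-max, indexed for/else scan with break)
-- into one filter-and-min over the sorted collection; objective: simpler. Both A and B mutate
-- ver_collection in place identically (delete 'latest', sort descending); the theorems are about the
-- return value only.

-- ===== PORT A =====
-- the for/else scan: for i in range(len(col)): if ver_adapte > col[i]: ret = col[i-1]; break
-- else: ret = col[len(col)-1]
def pvALoop (va : String) (col : List String) (i : Nat) : String :=
  if h : i < col.length then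
    if col[i] < va then
      (PySem.List.pyGet? col ((i : Int) - 1)).getD ""   -- col[i-1] (negative index if i = 0)
    else
      pvALoop va col (i + 1)
  else
    col.getD (col.length - 1) ""   -- for-else branch: col[len(col)-1]
termination_by col.length - i

def get_adapte_version (ver_adapte : String) (ver_collection : List String) : String :=
  if ver_adapte == "latest" then ver_adapte
  else
    match PySem.List.index? ver_collection "latest" with
    | none => ""   -- ValueError from .index; excluded by Pre_
    | some tmpindex =>
      match PySem.List.pop? ver_collection (tmpindex : Int) with
      | none => ""   -- unreachable: tmpindex is a valid index
      | some (_, col) =>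
        if col.length == 0 then "latest"
        else
          let s := PySem.List.sorted col (fun x => x) true
          if s.getD 0 "" < ver_adapte then "latest"
          else pvALoop ver_adapte s 0

-- ===== PORT B =====
def get_adapte_version_alt (ver_adapte : String) (ver_collection : List String) : String :=
  if ver_adapte == "latest" then ver_adapte
  else
    match PySem.List.remove? ver_collection "latest" with
    | none => ""   -- ValueError from .remove; excluded by Pre_
    | some col =>
      let s := PySem.List.sorted col (fun x => x) true
      let candidates := s.filter (fun v => ver_adapte ≤ v)
      match PySem.List.min? candidates (fun x => x) with
      | some m => m
      | none => "latest"

-- ===== PRECONDITION & SPEC =====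
-- Pre_ excludes exactly the inputs where A raises ValueError ('latest' absent from the collection
-- while ver_adapte ≠ 'latest'); B raises there too.
def Pre_get_adapte_version (ver_adapte : String) (ver_collection : List String) : Prop :=
  ver_adapte = "latest" ∨ "latest" ∈ ver_collection
instance (ver_adapte : String) (ver_collection : List String) : Decidable (Pre_get_adapte_version ver_adapte ver_collection) := by unfold Pre_get_adapte_version; infer_instance

def pvWitness_get_adapte_version : String × List String := ("1.2", ["1.0", "latest", "2.0"])

def Spec_get_adapte_version (ver_adapte : String) (ver_collection : List String) (out : String) : Prop := out = get_adapte_version_alt ver_adapte ver_collection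
instance (ver_adapte : String) (ver_collection : List String) (out : String) : Decidable (Spec_get_adapte_version ver_adapte ver_collection out) := by unfold Spec_get_adapte_version; infer_instance

-- ===== CLAIM (what is proved, stated in full; the proofs are below) =====
def Claim_equal_get_adapte_version : Prop := ∀ (ver_adapte : String) (ver_collection : List String), Dom_get_adapte_version ver_adapte ver_collection → Pre_get_adapte_version ver_adapte ver_collection → Spec_get_adapte_version ver_adapte ver_collection (get_adapte_version ver_adapte ver_collection)

-- ===== LEMMAS AND PROOFS =====

-- descending pairwise order as index monotonicity
lemma pvDescMono (l : List String) (h : l.Pairwise (fun a b => b ≤ a)) :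
    ∀ (p q : Nat) (_ : p ≤ q) (hq : q < l.length), l[q] ≤ l[p]'(by omega) := by
  intro p q hpq hq
  rcases Nat.lt_or_eq_of_le hpq with h' | rfl
  · exact (List.pairwise_iff_getElem.mp h) p q (by omega) hq h'
  · exact le_rfl

-- A's scan, entered at index i ≥ 1 with va ≤ l[i-1] on an antitone l, returns some l[j]
-- with va ≤ l[j] and every later entry < va.
lemma pvALoop_spec (va : String) (l : List String)
    (hmono : ∀ (p q : Nat) (_ : p ≤ q) (hq : q < l.length), l[q] ≤ l[p]'(by omega)) :
    ∀ (n i : Nat) (_ : l.length - i = n) (_ : 0 < i) (_ : i ≤ l.length)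
      (_ : va ≤ l[i - 1]'(by omega)),
      ∃ (j : Nat) (hj : j < l.length), pvALoop va l i = l[j] ∧ va ≤ l[j] ∧
        ∀ (k : Nat) (_ : j < k) (hk : k < l.length), l[k] < va := by
  intro n
  induction n with
  | zero =>
    intro i hn hpos hle hva
    have hi : i = l.length := by omega
    have hlpos : 0 < l.length := by omega
    refine ⟨l.length - 1, Nat.sub_lt hlpos one_pos, ?_, ?_, ?_⟩
    · rw [pvALoop]
      simp [show ¬ i < l.length by omega,
        List.getElem?_eq_getElem (Nat.sub_lt hlpos one_pos)]
    · have : i - 1 = l.length - 1 := by omega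
      simpa [this] using hva
    · intro k hk1 hk2; omega
  | succ n ih =>
    intro i hn hpos hle hva
    have hi : i < l.length := by omega
    rw [pvALoop]
    simp only [hi, dif_pos]
    by_cases hcmp : l[i] < va
    · simp only [hcmp, if_true]
      refine ⟨i - 1, by omega, ?_, hva, ?_⟩
      · have : (i : Int) - 1 = ((i - 1 : Nat) : Int) := by omega
        rw [this, PySem.List.pyGet?_natCast]
        simp [List.getElem?_eq_getElem (show i - 1 < l.length by omega)]
      · intro k hk1 hk2
        exact lt_of_le_of_lt (hmono i k (by omega) hk2) hcmp
    · simp only [hcmp, if_false]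
      have hva' : va ≤ l[i]'hi := not_lt.mp hcmp
      have := ih (i + 1) (by omega) (by omega) (by omega) (by simpa using hva')
      exact this

-- core: A's branch structure on the sorted list equals B's filter-and-min
lemma pvCore (va : String) (col : List String) :
    (if col.length == 0 then "latest"
     else
       if (PySem.List.sorted col (fun x => x) true).getD 0 "" < va then "latest"
       else pvALoop va (PySem.List.sorted col (fun x => x) true) 0)
    =
    (match PySem.List.min? ((PySem.List.sorted col (fun x => x) true).filter (fun v => va ≤ v)) (fun x => x) with
     | some m => m
     | none => "latest") := by
  set s := PySem.List.sorted col (fun x => x) true with hs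
  have hperm : s.Perm col := PySem.List.sorted_perm col _ true
  have hpw : s.Pairwise (fun a b => b ≤ a) := by
    simpa using PySem.List.sorted_pairwise_rev (key := fun x => x) col
  have hmono := pvDescMono s hpw
  by_cases hnil : col = []
  · subst hnil
    simp [hs, PySem.List.sorted, PySem.List.min?]
  · have hcl : col.length ≠ 0 := by simpa [List.length_eq_zero_iff] using hnil
    have hsl : 0 < s.length := by
      have := hperm.length_eq; omega
    simp only [beq_iff_eq, hcl, if_false]
    by_cases htop : s.getD 0 "" < va
    · -- all elements < va: filter is empty
      have hfe : s.filter (fun v => va ≤ v) = [] := by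
        rw [List.filter_eq_nil_iff]
        intro y hy
        obtain ⟨q, hq, rfl⟩ := List.mem_iff_getElem.mp hy
        have h0 : s[q] ≤ s[0]'hsl := hmono 0 q (by omega) hq
        have : s.getD 0 "" = s[0]'hsl := List.getD_eq_getElem s "" hsl
        simp only [decide_eq_true_eq, not_le]
        calc s[q] ≤ s[0]'hsl := h0
          _ < va := by rw [← this]; exact htop
      rw [if_pos htop, hfe]
      rfl
    · simp only [htop, if_false]
      have hva0 : va ≤ s[0]'hsl := by
        have : s.getD 0 "" = s[0]'hsl := List.getD_eq_getElem s "" hsl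
        exact not_lt.mp (this ▸ htop)
      -- unroll the loop once: at i = 0 the comparison fails
      have hstep : pvALoop va s 0 = pvALoop va s 1 := by
        rw [pvALoop]
        simp [hsl, not_lt.mpr hva0]
      obtain ⟨j, hj, hret, hvaj, hlater⟩ :=
        pvALoop_spec va s hmono (s.length - 1) 1 (by omega) (by omega) (by omega) (by simpa using hva0)
      have hmemf : s[j] ∈ s.filter (fun v => va ≤ v) :=
        List.mem_filter.mpr ⟨List.getElem_mem hj, by simpa using hvaj⟩
      have hfne : s.filter (fun v => va ≤ v) ≠ [] := by
        intro h; rw [h] at hmemf; exact (List.not_mem_nil hmemf)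
      obtain ⟨m, hm⟩ : ∃ m, PySem.List.min? (s.filter (fun v => va ≤ v)) (fun x => x) = some m := by
        rcases h : PySem.List.min? (s.filter (fun v => va ≤ v)) (fun x => x) with _ | m
        · exact absurd ((PySem.List.min?_eq_none_iff _ _).mp h) hfne
        · exact ⟨m, rfl⟩
      have hmmem := PySem.List.min?_mem hm
      have hmmin := PySem.List.min?_isMin hm
      rw [hstep, hret, hm]
      obtain ⟨hms, hvam⟩ := List.mem_filter.mp hmmem
      have hvam : va ≤ m := by simpa using hvam
      obtain ⟨q, hq, hqm⟩ := List.mem_iff_getElem.mp hms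
      have hqj : q ≤ j := by
        by_contra h
        have := hlater q (by omega) hq
        rw [hqm] at this
        exact absurd hvam (not_le.mpr this)
      have h1 : s[j] ≤ m := hqm ▸ hmono q j hqj hj
      have h2 : m ≤ s[j] := hmmin s[j] hmemf
      exact le_antisymm h1 h2

theorem get_adapte_version_spec : Claim_equal_get_adapte_version := by
  unfold Claim_equal_get_adapte_version Spec_get_adapte_version
  intro va col _ hpre
  by_cases hlat : va = "latest"
  · simp [get_adapte_version, get_adapte_version_alt, hlat]
  · have hmem : "latest" ∈ col := by
      rcases hpre with h | h
      · exact absurd h hlat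
      · exact h
    obtain ⟨k, hk⟩ : ∃ k, PySem.List.index? col "latest" = some k := by
      rcases h : PySem.List.index? col "latest" with _ | k
      · exact absurd ((PySem.List.index?_eq_none_iff col "latest").mp h) (by simpa using hmem)
      · exact ⟨k, rfl⟩
    obtain ⟨hklt, _, _⟩ := PySem.List.getElem_of_index?_eq_some hk
    have hidx : col.idxOf "latest" = k := by
      have := PySem.List.index?_eq_idxOf? (xs := col) (v := "latest")
      rw [this] at hk
      rw [List.idxOf_eq_getD_idxOf?, hk]; rfl
    have herase : col.eraseIdx k = col.erase "latest" := by
      rw [← hidx]; exact List.eraseIdx_idxOf_eq_erase "latest" col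
    have hrem : PySem.List.remove? col "latest" = some (col.erase "latest") :=
      PySem.List.remove?_eq_some_erase col "latest" hmem
    have hpop : PySem.List.pop? col (k : Int) = some (col[k], col.eraseIdx k) :=
      PySem.List.pop?_natCast col k hklt
    simp only [get_adapte_version, get_adapte_version_alt, beq_iff_eq, hlat, if_false,
      hk, hrem, hpop, herase]
    simpa using pvCore va (col.erase "latest")
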